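-- pv_equiv track=rewrite | github.com/pjj11005/Coding_Test | Baekjoon/week30/9205.py | bfs
-- ===== SOURCE A (Python) =====
-- from collections import deque
--
-- def bfs(x, y, fx, fy, n, cvs):
--   q = deque([(x, y)])
--   visited = [0] * n  # 편의점 방문 배열
--
--   while q:
--     a, b = q.popleft()
--
--     # 페스티발 도착
--     if abs(a - fx) + abs(b - fy) <= 1000:
--       return 'happy'
--
--     # 도달 가능한 편의점으로 이동
--     for i in range(n):
--       if not visited[i]:
--         nx, ny = cvs[i]
--         if abs(a - nx) + abs(b - ny) <= 1000:
--           visited[i] = 1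
--           q.append((nx, ny))
--
--   return 'sad'
-- ===== SOURCE B (Python) =====
-- def bfs(x, y, fx, fy, n, cvs):
--     # Saturation-closure instead of a BFS queue: grow the reached set to a fixed
--     # point by repeated passes over the not-yet-reached stores, then do one final
--     # festival check.
--     reached = [(x, y)]
--     remaining = cvs[:max(0, n)]
--     changed = True
--     while changed:
--         changed = False
--         still = []
--         for (sx, sy) in remaining:
--             if any(abs(sx - rx) + abs(sy - ry) <= 1000 for (rx, ry) in reached):
--                 reached.append((sx, sy))
--                 changed = True
--             else:
--                 still.append((sx, sy))
--         remaining = still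
--     return 'happy' if any(abs(rx - fx) + abs(ry - fy) <= 1000 for (rx, ry) in reached) else 'sad'
-- ===== Notes on version B (the rewrite author's own statement) =====
-- stated objective: alternative
-- what changed: Replaces the BFS queue/visited-array traversal with fixed-point saturation: repeated passes move every store within distance 1000 of an already-reached point from a 'remaining' list into the reached set until a pass changes nothing, and the festival test becomes one final scan instead of a per-popped-node check.
import Mathlib
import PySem

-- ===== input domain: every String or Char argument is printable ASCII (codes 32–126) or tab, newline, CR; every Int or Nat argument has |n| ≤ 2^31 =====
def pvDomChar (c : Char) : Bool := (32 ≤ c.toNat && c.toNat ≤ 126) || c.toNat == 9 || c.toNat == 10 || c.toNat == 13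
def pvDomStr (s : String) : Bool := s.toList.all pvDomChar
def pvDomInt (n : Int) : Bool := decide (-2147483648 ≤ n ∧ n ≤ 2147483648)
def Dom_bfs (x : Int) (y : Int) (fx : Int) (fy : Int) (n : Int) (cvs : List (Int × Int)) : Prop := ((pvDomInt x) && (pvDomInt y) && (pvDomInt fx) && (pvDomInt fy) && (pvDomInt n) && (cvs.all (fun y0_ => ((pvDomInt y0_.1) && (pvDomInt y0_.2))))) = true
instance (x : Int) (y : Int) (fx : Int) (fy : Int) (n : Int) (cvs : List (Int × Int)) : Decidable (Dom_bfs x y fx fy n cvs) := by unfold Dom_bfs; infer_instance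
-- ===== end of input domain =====

-- B replaces A's BFS queue/visited traversal by fixed-point saturation over a shrinking
-- "remaining" list with one final festival check (alternative decomposition, same cost class).


-- ===== PORT A =====
-- inner 'for i in range(n)' loop of A: marks unvisited stores within 1000 and appends them;
-- none = IndexError (cvs[i] out of range)
def scanA (a : Int) (b : Int) (cvs : List (Int × Int)) :
    List Nat → List Int × List (Int × Int) → Option (List Int × List (Int × Int))
  | [], st => some st
  | i :: is, (vis, q) =>
    match PySem.List.pyGet? vis (i : Int) with
    | none => none
    | some v =>
      if v = 0 then
        match PySem.List.pyGet? cvs (i : Int) with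
        | none => none
        | some s =>
          if |a - s.1| + |b - s.2| ≤ 1000 then
            scanA a b cvs is (vis.set i 1, q ++ [s])
          else scanA a b cvs is (vis, q)
      else scanA a b cvs is (vis, q)

-- helper for scanA_measure (setting a 0 entry to 1 lowers the 0-count by one)
theorem count_set_zero_one : ∀ (l : List Int) (i : Nat), l[i]? = some 0 → (l.set i 1).count 0 + 1 = l.count 0 := by
  intro l
  induction l with
  | nil => intro i h; simp at h
  | cons a t ih =>
    intro i h
    cases i with
    | zero => simp_all
    | succ j =>
      simp only [List.getElem?_cons_succ] at h
      have := ih j h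
      simp only [List.set_cons_succ, List.count_cons]
      omega

-- needed by loopA's termination: each append to q sets one 0 to 1 in vis
theorem scanA_measure (a b : Int) (cvs : List (Int × Int)) :
    ∀ (is : List Nat) (vis : List Int) (q : List (Int × Int)) (vis' : List Int)
      (q' : List (Int × Int)),
      scanA a b cvs is (vis, q) = some (vis', q') →
      q'.length + 2 * vis'.count 0 ≤ q.length + 2 * vis.count 0 := by
  intro is
  induction is with
  | nil =>
    intro vis q vis' q' h
    simp only [scanA, Option.some.injEq, Prod.mk.injEq] at h
    obtain ⟨h1, h2⟩ := h
    subst h1; subst h2; omega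
  | cons i is ih =>
    intro vis q vis' q' h
    simp only [scanA, PySem.List.pyGet?_natCast] at h
    split at h
    · exact absurd h (by simp)
    · rename_i v hv
      split at h
      · rename_i hveq
        split at h
        · exact absurd h (by simp)
        · rename_i s hs
          split at h
          · have := ih _ _ _ _ h
            subst hveq
            have hc := count_set_zero_one vis i hv
            simp only [List.length_append, List.length_cons, List.length_nil] at this
            omega
          · exact ih _ _ _ _ h
      · exact ih _ _ _ _ h

-- the 'while q' loop of A
def loopA (fx fy : Int) (cvs : List (Int × Int)) (N : Nat) :
    List (Int × Int) → List Int → String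
  | [], _ => "sad"
  | (a, b) :: rest, vis =>
    if |a - fx| + |b - fy| ≤ 1000 then "happy"
    else
      match h : scanA a b cvs (List.range N) (vis, rest) with
      | none => "sad"   -- Python raises IndexError here (outside Pre_); value irrelevant
      | some (vis', q') => loopA fx fy cvs N q' vis'
termination_by q vis => q.length + 2 * vis.count 0
decreasing_by
  have := scanA_measure a b cvs (List.range N) vis rest vis' q' h
  simp only [List.length_cons]
  omega

def bfs (x : Int) (y : Int) (fx : Int) (fy : Int) (n : Int) (cvs : List (Int × Int)) : String :=
  loopA fx fy cvs n.toNat [(x, y)] (List.replicate n.toNat 0)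

-- ===== PORT B =====
-- one pass of Source B's inner 'for' loop: returns (reached', still, changed)
def passB (reached : List (Int × Int)) :
    List (Int × Int) → List (Int × Int) × List (Int × Int) × Bool
  | [] => (reached, [], false)
  | s :: rest =>
    if reached.any (fun r => decide (|s.1 - r.1| + |s.2 - r.2| ≤ 1000)) then
      let res := passB (reached ++ [s]) rest
      (res.1, res.2.1, true)
    else
      let res := passB reached rest
      (res.1, s :: res.2.1, res.2.2)

-- needed by satLoop's termination
theorem passB_still_length (reached : List (Int × Int)) :
    ∀ rem : List (Int × Int),
      (passB reached rem).2.1.length ≤ rem.length ∧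
      ((passB reached rem).2.2 = true → (passB reached rem).2.1.length < rem.length) := by
  intro rem
  induction rem generalizing reached with
  | nil => simp [passB]
  | cons s rest ih =>
    simp only [passB]
    split
    · have := (ih (reached ++ [s])).1
      constructor
      · simpa using Nat.le_succ_of_le this
      · intro _; simpa using Nat.lt_succ_of_le this
    · obtain ⟨h1, h2⟩ := ih reached
      constructor
      · simpa using h1
      · intro hf
        simp only [List.length_cons]
        exact Nat.succ_lt_succ (h2 hf)

-- the 'while changed' loop of Source B
def satLoop (reached remaining : List (Int × Int)) : List (Int × Int) :=
  let res := passB reached remaining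
  if h : res.2.2 = true then satLoop res.1 res.2.1 else res.1
termination_by remaining.length
decreasing_by
  exact (passB_still_length reached remaining).2 h

def bfs_alt (x : Int) (y : Int) (fx : Int) (fy : Int) (n : Int) (cvs : List (Int × Int)) : String :=
  let stores := PySem.List.slice cvs none (some (max 0 n))   -- cvs[:max(0, n)]
  let reached := satLoop [(x, y)] stores
  if reached.any (fun r => decide (|r.1 - fx| + |r.2 - fy| ≤ 1000)) then "happy" else "sad"

-- ===== PRECONDITION & SPEC =====
-- Pre_ excludes exactly the inputs where A raises IndexError: n > len(cvs) while the start
-- is not already within 1000 of the festival (then A reads cvs[i] for an i ≥ len(cvs)).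
def Pre_bfs (x : Int) (y : Int) (fx : Int) (fy : Int) (n : Int) (cvs : List (Int × Int)) : Prop :=
  n ≤ (cvs.length : Int) ∨ |x - fx| + |y - fy| ≤ 1000
instance (x : Int) (y : Int) (fx : Int) (fy : Int) (n : Int) (cvs : List (Int × Int)) : Decidable (Pre_bfs x y fx fy n cvs) := by unfold Pre_bfs; infer_instance

def pvWitness_bfs : Int × Int × Int × Int × Int × (List (Int × Int)) :=
  (0, 0, 1500, 0, 1, [(700, 0)])

def Spec_bfs (x : Int) (y : Int) (fx : Int) (fy : Int) (n : Int) (cvs : List (Int × Int)) (out : String) : Prop := out = bfs_alt x y fx fy n cvs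
instance (x : Int) (y : Int) (fx : Int) (fy : Int) (n : Int) (cvs : List (Int × Int)) (out : String) : Decidable (Spec_bfs x y fx fy n cvs out) := by unfold Spec_bfs; infer_instance

-- ===== CLAIM (what is proved, stated in full; the proofs are below) =====
def Claim_equal_bfs : Prop := ∀ (x : Int) (y : Int) (fx : Int) (fy : Int) (n : Int) (cvs : List (Int × Int)), Dom_bfs x y fx fy n cvs → Pre_bfs x y fx fy n cvs → Spec_bfs x y fx fy n cvs (bfs x y fx fy n cvs)


-- ===== LEMMAS AND PROOFS =====

-- distance-≤-1000 relation between points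
def Close (u v : Int × Int) : Prop := |u.1 - v.1| + |u.2 - v.2| ≤ 1000

theorem Close.flip {u v : Int × Int} (h : Close u v) : Close v u := by
  unfold Close at *
  rw [abs_sub_comm v.1 u.1, abs_sub_comm v.2 u.2]
  exact h

-- reachability from p0 through stores S, stepping between points within distance 1000
def Reach (p0 : Int × Int) (S : List (Int × Int)) (p : Int × Int) : Prop :=
  Relation.ReflTransGen (fun u v => v ∈ S ∧ Close u v) p0 p

theorem passB_fst_superset (rem : List (Int × Int)) :
    ∀ reached p, p ∈ reached → p ∈ (passB reached rem).1 := by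
  induction rem with
  | nil => intro reached p hp; simpa [passB] using hp
  | cons s rest ih =>
    intro reached p hp
    simp only [passB]
    split
    · exact ih (reached ++ [s]) p (by simp [hp])
    · exact ih reached p hp

theorem passB_still_subset (rem : List (Int × Int)) :
    ∀ reached p, p ∈ (passB reached rem).2.1 → p ∈ rem := by
  induction rem with
  | nil => intro reached p hp; simp [passB] at hp
  | cons s rest ih =>
    intro reached p hp
    simp only [passB] at hp
    split at hp
    · exact List.mem_cons_of_mem s (ih _ p hp)
    · rcases List.mem_cons.1 hp with h | h
      · simp [h]
      · exact List.mem_cons_of_mem s (ih _ p h)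

theorem passB_cover (rem : List (Int × Int)) :
    ∀ reached p, p ∈ rem → p ∈ (passB reached rem).1 ∨ p ∈ (passB reached rem).2.1 := by
  induction rem with
  | nil => intro reached p hp; simp at hp
  | cons s rest ih =>
    intro reached p hp
    simp only [passB]
    split
    · rcases List.mem_cons.1 hp with h | h
      · subst h
        exact Or.inl (passB_fst_superset rest (reached ++ [p]) p (by simp))
      · exact ih _ p h
    · rcases List.mem_cons.1 hp with h | h
      · subst h; simp
      · rcases ih reached p h with h' | h'
        · exact Or.inl h'
        · exact Or.inr (List.mem_cons_of_mem s h')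

theorem passB_sound (p0 : Int × Int) (S : List (Int × Int)) (rem : List (Int × Int)) :
    ∀ reached, (∀ p ∈ reached, Reach p0 S p) → (∀ p ∈ rem, p ∈ S) →
      ∀ p ∈ (passB reached rem).1, Reach p0 S p := by
  induction rem with
  | nil => intro reached hr _ p hp; simp [passB] at hp; exact hr p hp
  | cons s rest ih =>
    intro reached hr hS p hp
    simp only [passB] at hp
    split at hp
    · rename_i hany
      rcases List.any_eq_true.1 hany with ⟨r, hrmem, hdr⟩
      have hineq : |s.1 - r.1| + |s.2 - r.2| ≤ 1000 := of_decide_eq_true hdr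
      have hrs : Close r s := Close.flip (show Close s r from hineq)
      have hs : Reach p0 S s :=
        Relation.ReflTransGen.tail (hr r hrmem) ⟨hS s (by simp), hrs⟩
      refine ih _ ?_ (fun p hp' => hS p (List.mem_cons_of_mem s hp')) p hp
      intro q hq
      rcases List.mem_append.1 hq with h | h
      · exact hr q h
      · simp at h; subst h; exact hs
    · exact ih reached hr (fun p hp' => hS p (List.mem_cons_of_mem s hp')) p hp

theorem passB_false_eq (rem : List (Int × Int)) :
    ∀ reached, (passB reached rem).2.2 = false →
      (passB reached rem).1 = reached ∧ (passB reached rem).2.1 = rem := by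
  induction rem with
  | nil => intro reached _; simp [passB]
  | cons s rest ih =>
    intro reached hf
    simp only [passB] at hf ⊢
    split at hf
    · simp at hf
    · rename_i hany
      simp only [] at hf
      obtain ⟨h1, h2⟩ := ih reached hf
      refine ⟨?_, ?_⟩
      · simpa [hany] using h1
      · simp [hany, h1, h2]

theorem passB_false_far (rem : List (Int × Int)) :
    ∀ reached, (passB reached rem).2.2 = false →
      ∀ s ∈ rem, ∀ r ∈ reached, ¬ Close s r := by
  induction rem with
  | nil => intro reached _ s hs; simp at hs
  | cons s0 rest ih =>
    intro reached hf s hs r hr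
    simp only [passB] at hf
    split at hf
    · simp at hf
    · rename_i hany
      rcases List.mem_cons.1 hs with h | h
      · subst h
        intro hclose
        unfold Close at hclose
        have hone : (reached.any fun r => decide (|s.1 - r.1| + |s.2 - r.2| ≤ 1000)) = true :=
          List.any_eq_true.2 ⟨r, hr, decide_eq_true hclose⟩
        exact hany hone
      · exact ih reached hf s h r hr

theorem satLoop_spec (p0 : Int × Int) (S : List (Int × Int)) :
    ∀ (reached rem : List (Int × Int)),
      p0 ∈ reached →
      (∀ p ∈ reached, Reach p0 S p) →
      (∀ p ∈ rem, p ∈ S) →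
      (∀ p ∈ S, p ∈ reached ∨ p ∈ rem) →
      (∀ p ∈ satLoop reached rem, Reach p0 S p) ∧
      (∀ p, Reach p0 S p → p ∈ satLoop reached rem) := by
  intro reached rem
  induction reached, rem using satLoop.induct with
  | case1 reached rem res hres ih =>
    intro hp0 hsound hremS hcover
    rw [satLoop, dif_pos (show (passB reached rem).2.2 = true from hres)]
    refine ih (passB_fst_superset rem reached p0 hp0)
      (passB_sound p0 S rem reached hsound hremS)
      (fun p hp => hremS p (passB_still_subset rem reached p hp))
      (fun p hp => ?_)
    rcases hcover p hp with h | h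
    · exact Or.inl (passB_fst_superset rem reached p h)
    · exact passB_cover rem reached p h
  | case2 reached rem res hres =>
    intro hp0 hsound hremS hcover
    have hne : ¬ (passB reached rem).2.2 = true := hres
    have hfalse : (passB reached rem).2.2 = false := eq_false_of_ne_true hne
    rw [satLoop, dif_neg hne]
    obtain ⟨heq1, heq2⟩ := passB_false_eq rem reached hfalse
    rw [heq1]
    refine ⟨hsound, ?_⟩
    intro p hreach
    unfold Reach at hreach
    induction hreach with
    | refl => exact hp0
    | tail hpath hstep ih2 =>
      obtain ⟨hvS, hclose⟩ := hstep
      rcases hcover _ hvS with h | h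
      · exact h
      · exact absurd (Close.flip hclose) (passB_false_far rem reached hfalse _ h _ ih2)

theorem bfs_alt_happy_iff (x y fx fy n : Int) (cvs : List (Int × Int)) :
    bfs_alt x y fx fy n cvs = "happy" ↔
      ∃ p, Reach (x, y) (cvs.take n.toNat) p ∧ Close p (fx, fy) := by
  have hslice : PySem.List.slice cvs none (some (max 0 n)) = cvs.take n.toNat := by
    rw [PySem.List.slice_to cvs (le_max_left 0 n)]
    congr 1
    omega
  obtain ⟨hs, hc⟩ := satLoop_spec (x, y) (cvs.take n.toNat) [(x, y)] (cvs.take n.toNat)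
    (by simp)
    (by intro p hp; simp at hp; subst hp; exact Relation.ReflTransGen.refl)
    (fun p hp => hp) (fun p hp => Or.inr hp)
  unfold bfs_alt
  rw [hslice]
  by_cases hany :
      (satLoop [(x, y)] (cvs.take n.toNat)).any
        (fun r => decide (|r.1 - fx| + |r.2 - fy| ≤ 1000)) = true
  · rw [if_pos hany]
    refine ⟨fun _ => ?_, fun _ => rfl⟩
    rcases List.any_eq_true.1 hany with ⟨r, hr, hd⟩
    have hd' : |r.1 - fx| + |r.2 - fy| ≤ 1000 := of_decide_eq_true hd
    exact ⟨r, hs r hr, hd'⟩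
  · rw [if_neg hany]
    constructor
    · intro h; exact absurd h (by decide)
    · rintro ⟨p, hreach, hclose⟩
      unfold Close at hclose
      exact absurd (List.any_eq_true.2 ⟨p, hc p hreach, decide_eq_true hclose⟩) hany

theorem bfs_alt_out (x y fx fy n : Int) (cvs : List (Int × Int)) :
    bfs_alt x y fx fy n cvs = "happy" ∨ bfs_alt x y fx fy n cvs = "sad" := by
  by_cases h :
      ((satLoop [(x, y)] (PySem.List.slice cvs none (some (max 0 n)))).any
        (fun r => decide (|r.1 - fx| + |r.2 - fy| ≤ 1000))) = true
  · exact Or.inl (by simp only [bfs_alt, h, if_pos])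
  · exact Or.inr (by simp only [bfs_alt, h, Bool.false_eq_true, reduceIte])

-- one BFS step of A: move to an unvisited store within distance 1000
def StepV (cvs : List (Int × Int)) (vis : List Int) (u v : Int × Int) : Prop :=
  (∃ i : Nat, vis[i]? = some 0 ∧ cvs[i]? = some v) ∧ Close u v

-- reachability from some queue element through unvisited stores
def ReachV (cvs : List (Int × Int)) (vis : List Int) (q : List (Int × Int))
    (p : Int × Int) : Prop :=
  ∃ s ∈ q, Relation.ReflTransGen (StepV cvs vis) s p

theorem scanA_some (a b : Int) (cvs : List (Int × Int)) :
    ∀ (is : List Nat) (vis : List Int) (q : List (Int × Int)),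
      (∀ i ∈ is, i < vis.length ∧ i < cvs.length) →
      ∃ r, scanA a b cvs is (vis, q) = some r := by
  intro is
  induction is with
  | nil => intro vis q _; exact ⟨(vis, q), rfl⟩
  | cons i is ih =>
    intro vis q hbound
    obtain ⟨hv, hc⟩ := hbound i (by simp)
    have hbtail : ∀ j ∈ is, j < vis.length ∧ j < cvs.length :=
      fun j hj => hbound j (List.mem_cons_of_mem i hj)
    simp only [scanA, PySem.List.pyGet?_natCast, List.getElem?_eq_getElem hv,
      List.getElem?_eq_getElem hc]
    split
    · split
      · exact ih (vis.set i 1) (q ++ [cvs[i]])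
          (fun j hj => by simpa [List.length_set] using hbtail j hj)
      · exact ih vis q hbtail
    · exact ih vis q hbtail

theorem scanA_spec (a b : Int) (cvs : List (Int × Int)) :
    ∀ (is : List Nat) (vis : List Int) (q : List (Int × Int)) (vis' : List Int)
      (q' : List (Int × Int)),
      scanA a b cvs is (vis, q) = some (vis', q') →
      vis'.length = vis.length ∧
      (∀ p ∈ q, p ∈ q') ∧
      (∀ j : Nat, vis'[j]? = vis[j]? ∨
        (vis'[j]? = some 1 ∧ vis[j]? = some 0 ∧
          ∃ v, cvs[j]? = some v ∧ Close (a, b) v ∧ v ∈ q')) ∧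
      (∀ p ∈ q', p ∈ q ∨ ∃ i ∈ is, vis[i]? = some 0 ∧ cvs[i]? = some p ∧ Close (a, b) p) ∧
      (∀ i ∈ is, ∀ v, vis[i]? = some 0 → cvs[i]? = some v → Close (a, b) v → v ∈ q') := by
  intro is
  induction is with
  | nil =>
    intro vis q vis' q' h
    simp only [scanA, Option.some.injEq, Prod.mk.injEq] at h
    obtain ⟨h1, h2⟩ := h
    subst h1; subst h2
    refine ⟨rfl, fun p hp => hp, fun j => Or.inl rfl, fun p hp => Or.inl hp, ?_⟩
    intro i hi; simp at hi
  | cons i is ih =>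
    intro vis q vis' q' h
    simp only [scanA, PySem.List.pyGet?_natCast] at h
    split at h
    · exact absurd h (by simp)
    · rename_i v hvi
      have hiL : i < vis.length := by
        by_contra hge
        rw [List.getElem?_eq_none_iff.2 (by omega)] at hvi
        exact absurd hvi (by simp)
      split at h
      · rename_i hveq
        subst hveq
        split at h
        · exact absurd h (by simp)
        · rename_i s hs
          split at h
          · -- store i is unvisited, close: marked and enqueued
            rename_i hcl
            have hclose : Close (a, b) s := hcl
            obtain ⟨L, Sub, Mark, Src, All⟩ := ih _ _ _ _ h
            have hset1 : (vis.set i 1)[i]? = some 1 := List.getElem?_set_self hiL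
            have hsq' : s ∈ q' := Sub s (by simp)
            refine ⟨by rw [L, List.length_set], fun p hp => Sub p (by simp [hp]), ?_, ?_, ?_⟩
            · intro j
              by_cases hj : j = i
              · subst hj
                rcases Mark j with heq | ⟨h1', h0', _⟩
                · exact Or.inr ⟨heq.trans hset1, hvi, s, hs, hclose, hsq'⟩
                · rw [hset1] at h0'; exact absurd h0' (by simp)
              · have hne : (vis.set i 1)[j]? = vis[j]? := List.getElem?_set_ne (Ne.symm (by omega)) 
                rcases Mark j with heq | ⟨h1', h0', v', hv', hcl', hq'⟩
                · exact Or.inl (heq.trans hne)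
                · exact Or.inr ⟨h1', hne ▸ h0', v', hv', hcl', hq'⟩
            · intro p hp
              rcases Src p hp with hpq | ⟨i', hi'm, hvi', hci', hcli'⟩
              · rcases List.mem_append.1 hpq with h' | h'
                · exact Or.inl h'
                · simp at h'; subst h'
                  exact Or.inr ⟨i, by simp, hvi, hs, hclose⟩
              · have hi'ne : i' ≠ i := by
                  intro heq; subst heq
                  rw [hset1] at hvi'; exact absurd hvi' (by simp)
                rw [List.getElem?_set_ne (Ne.symm hi'ne)] at hvi'
                exact Or.inr ⟨i', List.mem_cons_of_mem i hi'm, hvi', hci', hcli'⟩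
            · intro i0 hi0 v0 hv0 hc0 hcl0
              by_cases hi0i : i0 = i
              · subst hi0i
                rw [hs] at hc0
                exact (Option.some.inj hc0) ▸ hsq'
              · rcases List.mem_cons.1 hi0 with h' | h'
                · exact absurd h' hi0i
                · refine All i0 h' v0 ?_ hc0 hcl0
                  rw [List.getElem?_set_ne (Ne.symm hi0i)]
                  exact hv0
          · -- store i is unvisited but too far: skipped
            rename_i hncl
            obtain ⟨L, Sub, Mark, Src, All⟩ := ih _ _ _ _ h
            refine ⟨L, Sub, Mark, ?_, ?_⟩
            · intro p hp
              rcases Src p hp with hpq | ⟨i', hi'm, h1', h2', h3'⟩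
              · exact Or.inl hpq
              · exact Or.inr ⟨i', List.mem_cons_of_mem i hi'm, h1', h2', h3'⟩
            · intro i0 hi0 v0 hv0 hc0 hcl0
              rcases List.mem_cons.1 hi0 with h' | h'
              · subst h'
                rw [hc0] at hs
                have : v0 = s := Option.some.inj hs
                subst this
                exact absurd hcl0 hncl
              · exact All i0 h' v0 hv0 hc0 hcl0
      · -- store i already visited: skipped
        rename_i hvne
        obtain ⟨L, Sub, Mark, Src, All⟩ := ih _ _ _ _ h
        refine ⟨L, Sub, Mark, ?_, ?_⟩
        · intro p hp
          rcases Src p hp with hpq | ⟨i', hi'm, h1', h2', h3'⟩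
          · exact Or.inl hpq
          · exact Or.inr ⟨i', List.mem_cons_of_mem i hi'm, h1', h2', h3'⟩
        · intro i0 hi0 v0 hv0 hc0 hcl0
          rcases List.mem_cons.1 hi0 with h' | h'
          · subst h'
            rw [hv0] at hvi
            exact absurd (Option.some.inj hvi).symm hvne
          · exact All i0 h' v0 hv0 hc0 hcl0

theorem stepV_mono (cvs : List (Int × Int)) (vis vis' : List Int)
    (Hmono : ∀ j : Nat, vis'[j]? = some 0 → vis[j]? = some 0) {s p : Int × Int}
    (h : Relation.ReflTransGen (StepV cvs vis') s p) :
    Relation.ReflTransGen (StepV cvs vis) s p :=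
  Relation.ReflTransGen.mono
    (fun _ _ hst => ⟨⟨hst.1.choose, Hmono _ hst.1.choose_spec.1, hst.1.choose_spec.2⟩, hst.2⟩) h

theorem surgery (a b : Int) (cvs : List (Int × Int)) (vis vis' : List Int)
    (q' : List (Int × Int))
    (H : ∀ j : Nat, vis'[j]? = vis[j]? ∨
      (vis'[j]? = some 1 ∧ vis[j]? = some 0 ∧
        ∃ v, cvs[j]? = some v ∧ Close (a, b) v ∧ v ∈ q')) :
    ∀ s p : Int × Int, Relation.ReflTransGen (StepV cvs vis) s p →
      Relation.ReflTransGen (StepV cvs vis') s p ∨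
      ∃ t ∈ q', Relation.ReflTransGen (StepV cvs vis') t p := by
  intro s p hpath
  induction hpath with
  | refl => exact Or.inl Relation.ReflTransGen.refl
  | tail hp hstep ih =>
    obtain ⟨⟨i, hvi, hci⟩, hcl⟩ := hstep
    rcases H i with heq | ⟨h1, h0, v, hv, _, hvq⟩
    · have hstep' : StepV cvs vis' _ _ := ⟨⟨i, heq.trans hvi, hci⟩, hcl⟩
      rcases ih with h' | ⟨t, ht, hpath'⟩
      · exact Or.inl (h'.tail hstep')
      · exact Or.inr ⟨t, ht, hpath'.tail hstep'⟩
    · rw [hci] at hv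
      exact Or.inr ⟨_, (Option.some.inj hv) ▸ hvq, Relation.ReflTransGen.refl⟩

theorem loopA_out (fx fy : Int) (cvs : List (Int × Int)) (N : Nat) :
    ∀ (q : List (Int × Int)) (vis : List Int),
      loopA fx fy cvs N q vis = "happy" ∨ loopA fx fy cvs N q vis = "sad" := by
  intro q vis
  induction q, vis using loopA.induct fx fy cvs N with
  | case1 vis => rw [loopA]; exact Or.inr rfl
  | case2 a b rest vis hcl => rw [loopA, if_pos hcl]; exact Or.inl rfl
  | case3 a b rest vis hcl hm => rw [loopA, if_neg hcl, hm]; exact Or.inr rfl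
  | case4 a b rest vis hcl vis' q' hm ih => rw [loopA, if_neg hcl, hm]; exact ih

theorem loopA_happy_iff (fx fy : Int) (cvs : List (Int × Int)) (N : Nat)
    (hN : N ≤ cvs.length) :
    ∀ (q : List (Int × Int)) (vis : List Int), vis.length = N →
      (loopA fx fy cvs N q vis = "happy" ↔
        ∃ p, ReachV cvs vis q p ∧ Close p (fx, fy)) := by
  intro q vis
  induction q, vis using loopA.induct fx fy cvs N with
  | case1 vis =>
    intro _
    rw [loopA]
    constructor
    · intro h; exact absurd h (by decide)
    · rintro ⟨p, ⟨s, hs, _⟩, _⟩; simp at hs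
  | case2 a b rest vis hcl =>
    intro _
    rw [loopA, if_pos hcl]
    refine ⟨fun _ => ⟨(a, b), ⟨(a, b), by simp, Relation.ReflTransGen.refl⟩, hcl⟩, fun _ => rfl⟩
  | case3 a b rest vis hcl hm =>
    intro hlen
    obtain ⟨r, hr⟩ := scanA_some a b cvs (List.range N) vis rest
      (fun i hi => ⟨by rw [hlen]; exact List.mem_range.1 hi,
        lt_of_lt_of_le (List.mem_range.1 hi) hN⟩)
    rw [hm] at hr
    exact absurd hr (by simp)
  | case4 a b rest vis hcl vis' q' hm ih =>
    intro hlen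
    obtain ⟨L, Sub, Mark, Src, All⟩ := scanA_spec a b cvs (List.range N) vis rest vis' q' hm
    have hlen' : vis'.length = N := L.trans hlen
    have Hmono : ∀ j : Nat, vis'[j]? = some 0 → vis[j]? = some 0 := by
      intro j hj
      rcases Mark j with heq | ⟨h1, _, _⟩
      · exact heq ▸ hj
      · rw [h1] at hj; exact absurd hj (by simp)
    rw [loopA, if_neg hcl, hm, ih hlen']
    constructor
    · -- reachable from the new queue ⇒ reachable from the old one
      rintro ⟨p, ⟨s, hsq', hpath⟩, hclp⟩
      have hpath' := stepV_mono cvs vis vis' Hmono hpath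
      rcases Src s hsq' with hsr | ⟨i, _, hvi, hci, hcls⟩
      · exact ⟨p, ⟨s, List.mem_cons_of_mem _ hsr, hpath'⟩, hclp⟩
      · exact ⟨p, ⟨(a, b), by simp,
          Relation.ReflTransGen.head ⟨⟨i, hvi, hci⟩, hcls⟩ hpath'⟩, hclp⟩
    · -- reachable from the old queue ⇒ reachable from the new one
      rintro ⟨p, ⟨s, hsq, hpath⟩, hclp⟩
      rcases List.mem_cons.1 hsq with hsab | hsrest
      · subst hsab
        rcases surgery a b cvs vis vis' q' Mark _ p hpath with hpath' | ⟨t, ht, hpath'⟩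
        · have hpne : p ≠ (a, b) := by
            intro hpe; subst hpe; exact hcl hclp
          rcases Relation.ReflTransGen.cases_head hpath' with heq | ⟨w, ⟨⟨i, hvi', hci⟩, hclw⟩, hrest⟩
          · exact absurd heq.symm hpne
          · have hvi0 : vis[i]? = some 0 := Hmono i hvi'
            have hiN : i < N := by
              by_contra hge
              rw [List.getElem?_eq_none_iff.2 (by omega)] at hvi'
              exact absurd hvi' (by simp)
            have hwq' : w ∈ q' := All i (List.mem_range.2 hiN) w hvi0 hci hclw
            exact ⟨p, ⟨w, hwq', hrest⟩, hclp⟩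
        · exact ⟨p, ⟨t, ht, hpath'⟩, hclp⟩
      · rcases surgery a b cvs vis vis' q' Mark _ p hpath with hpath' | ⟨t, ht, hpath'⟩
        · exact ⟨p, ⟨s, Sub s hsrest, hpath'⟩, hclp⟩
        · exact ⟨p, ⟨t, ht, hpath'⟩, hclp⟩

theorem stepV_replicate (cvs : List (Int × Int)) (N : Nat) (u v : Int × Int) :
    StepV cvs (List.replicate N (0 : Int)) u v ↔ (v ∈ cvs.take N ∧ Close u v) := by
  unfold StepV
  constructor
  · rintro ⟨⟨i, hvi, hci⟩, hcl⟩
    rw [List.getElem?_replicate] at hvi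
    have hiN : i < N := by
      by_contra hge
      rw [if_neg hge] at hvi
      exact absurd hvi (by simp)
    refine ⟨List.mem_iff_getElem?.2 ⟨i, ?_⟩, hcl⟩
    rw [List.getElem?_take, if_pos hiN]
    exact hci
  · rintro ⟨hv, hcl⟩
    obtain ⟨i, hi⟩ := List.mem_iff_getElem?.1 hv
    rw [List.getElem?_take] at hi
    have hiN : i < N := by
      by_contra hge
      rw [if_neg hge] at hi
      exact absurd hi (by simp)
    rw [if_pos hiN] at hi
    exact ⟨⟨i, by rw [List.getElem?_replicate, if_pos hiN], hi⟩, hcl⟩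

theorem reachV_bridge (cvs : List (Int × Int)) (N : Nat) (p0 p : Int × Int) :
    ReachV cvs (List.replicate N (0 : Int)) [p0] p ↔ Reach p0 (cvs.take N) p := by
  unfold ReachV Reach
  constructor
  · rintro ⟨s, hs, hpath⟩
    simp at hs
    subst hs
    exact Relation.ReflTransGen.mono (fun u v h => (stepV_replicate cvs N u v).1 h) hpath
  · intro h
    exact ⟨p0, by simp,
      Relation.ReflTransGen.mono (fun u v h' => (stepV_replicate cvs N u v).2 h') h⟩

-- ===== VERDICT (by name: the statement is the Claim_ definition above) =====
theorem bfs_spec : Claim_equal_bfs := by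
  intro x y fx fy n cvs _ hpre
  unfold Spec_bfs
  by_cases hc : |x - fx| + |y - fy| ≤ 1000
  · have hA : bfs x y fx fy n cvs = "happy" := by
      unfold bfs
      rw [loopA, if_pos hc]
    have hB : bfs_alt x y fx fy n cvs = "happy" :=
      (bfs_alt_happy_iff x y fx fy n cvs).2 ⟨(x, y), Relation.ReflTransGen.refl, hc⟩
    rw [hA, hB]
  · have hn : n ≤ (cvs.length : Int) := hpre.resolve_right hc
    have hN : n.toNat ≤ cvs.length := by omega
    have hbfs : bfs x y fx fy n cvs =
        loopA fx fy cvs n.toNat [(x, y)] (List.replicate n.toNat 0) := rfl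
    have hAiff : bfs x y fx fy n cvs = "happy" ↔
        ∃ p, Reach (x, y) (cvs.take n.toNat) p ∧ Close p (fx, fy) := by
      rw [hbfs,
        loopA_happy_iff fx fy cvs n.toNat hN [(x, y)] (List.replicate n.toNat 0) (by simp)]
      exact exists_congr fun p => and_congr_left' (reachV_bridge cvs n.toNat (x, y) p)
    have hBiff := bfs_alt_happy_iff x y fx fy n cvs
    rcases loopA_out fx fy cvs n.toNat [(x, y)] (List.replicate n.toNat 0) with hA | hA <;>
      rcases bfs_alt_out x y fx fy n cvs with hB | hB
    · rw [hbfs, hA, hB]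
    · exfalso
      have hP := hAiff.1 (by rw [hbfs]; exact hA)
      have := hBiff.2 hP
      rw [hB] at this
      exact absurd this (by decide)
    · exfalso
      have hP := hBiff.1 hB
      have := hAiff.2 hP
      rw [hbfs, hA] at this
      exact absurd this (by decide)
    · rw [hbfs, hA, hB]
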